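-- pv_equiv track=rewrite | github.com/danielenricocahall/AdventOfCode2024 | day_12/solution.py | find_region
-- ===== SOURCE A (Python) =====
-- from collections import defaultdict
--
-- def next_unvisited_region(visited: list[list[bool]]):
--     rows = len(visited)
--     cols = len(visited[0])
--     for i in range(rows):
--         for j in range(cols):
--             if not visited[i][j]:
--                 return i, j
--     return None
--
-- def find_region(puzzle: list[str]):
--     rows = len(puzzle)
--     cols = len(puzzle[0])
--     visited = [[False] * cols for _ in range(rows)]
--
--     current_region = 0
--     all_regions = defaultdict(set)
--     def _find_regions(current_position: tuple[int, int]):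
--         i, j = current_position
--         current_character = puzzle[i][j]
--         visited[i][j] = True
--         neighbors = get_neighbors(i, j, rows, cols)
--         existing_regions = []
--         for neighbor_i, neighbor_j in neighbors:
--             if not visited[neighbor_i][neighbor_j]:
--                 if puzzle[neighbor_i][neighbor_j] == current_character:
--                     existing_regions.append((neighbor_i, neighbor_j))
--         return existing_regions
--
--     while unvisited_region := next_unvisited_region(visited):
--         all_regions[current_region].add(unvisited_region)
--         new_regions = _find_regions(unvisited_region)
--         while new_regions:
--             new_region = new_regions.pop()
--             all_regions[current_region].add(new_region)
--             new_regions += _find_regions(new_region)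
--         current_region += 1
--     return all_regions
--
-- def get_neighbors(i: int, j: int, rows: int, cols: int):
--     neighbors = []
--     if i > 0:
--         neighbors.append((i - 1, j))
--     if i < rows - 1:
--         neighbors.append((i + 1, j))
--     if j > 0:
--         neighbors.append((i, j - 1))
--     if j < cols - 1:
--         neighbors.append((i, j + 1))
--     return neighbors
-- ===== SOURCE B (Python) =====
-- def find_region(puzzle: list[str]):
--     rows = len(puzzle)
--     cols = len(puzzle[0])
--     visited = [[False] * cols for _ in range(rows)]
--     regions = {}
--     label = 0
--     for si in range(rows):
--         for sj in range(cols):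
--             if visited[si][sj]:
--                 continue
--             ch = puzzle[si][sj]
--             cells = set()
--             stack = [(si, sj)]
--             while stack:
--                 i, j = stack.pop()
--                 cells.add((i, j))
--                 visited[i][j] = True
--                 for ni, nj in ((i - 1, j), (i + 1, j), (i, j - 1), (i, j + 1)):
--                     if 0 <= ni < rows and 0 <= nj < cols and not visited[ni][nj] and puzzle[ni][nj] == ch:
--                         stack.append((ni, nj))
--             regions[label] = cells
--             label += 1
--     return regions
-- ===== Notes on version B (the rewrite author's own statement) =====
-- stated objective: alternative
-- what changed: B replaces A's restart-from-scratch search for the next unvisited cell (a full grid rescan via next_unvisited_region before every region) with a single advancing row-major scan that flood-fills each region as it is first reached, trading A's repeated rescans for one pass over the grid.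
import Mathlib
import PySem

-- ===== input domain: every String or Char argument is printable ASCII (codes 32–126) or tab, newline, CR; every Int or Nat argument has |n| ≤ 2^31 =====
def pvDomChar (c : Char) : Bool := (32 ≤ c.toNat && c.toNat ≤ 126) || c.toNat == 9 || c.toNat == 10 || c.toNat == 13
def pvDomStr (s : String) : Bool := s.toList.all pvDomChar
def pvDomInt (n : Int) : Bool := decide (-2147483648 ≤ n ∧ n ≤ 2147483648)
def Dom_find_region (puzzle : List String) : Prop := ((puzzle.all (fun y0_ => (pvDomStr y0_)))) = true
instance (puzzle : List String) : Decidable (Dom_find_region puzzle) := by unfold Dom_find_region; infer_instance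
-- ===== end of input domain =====

-- B replaces A's full-grid rescan for the next unvisited seed (restarted before every region) by one
-- advancing row-major scan that flood-fills each region as it is first reached.

-- Shared grid-access helpers (both Pythons read/write `visited[i][j]` and `puzzle[i][j]`;
-- every such access in either program has 0 ≤ i < rows and 0 ≤ j < cols, so the defaults below are never hit).
def pvVget (v : List (List Bool)) (i j : Int) : Bool :=
  if 0 ≤ i ∧ 0 ≤ j then (v.getD i.toNat []).getD j.toNat true else true

def pvSetTrue (v : List (List Bool)) (i j : Int) : List (List Bool) :=
  v.modify i.toNat (fun row => row.set j.toNat true)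

def pvCharAt (puzzle : List String) (i j : Int) : Char :=
  (PySem.Str.pyGet? (PySem.List.pyGetD puzzle i "") j).getD ' '

-- number of False entries of `visited` (termination measure only)
def pvUnvis (v : List (List Bool)) : Nat := (v.map (fun row => row.count false)).sum

-- ===== PORT A =====
def get_neighbors (i j rows cols : Int) : List (Int × Int) :=
  ((if i > 0 then [(i - 1, j)] else []) ++ (if i < rows - 1 then [(i + 1, j)] else [])) ++
    ((if j > 0 then [(i, j - 1)] else []) ++ (if j < cols - 1 then [(i, j + 1)] else []))

def next_unvisited_region (visited : List (List Bool)) : Option (Int × Int) :=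
  let rows : Int := visited.length
  let cols : Int := (visited.headD []).length
  (PySem.List.pyRange 0 rows 1).findSome? (fun i =>
    (PySem.List.pyRange 0 cols 1).findSome? (fun j =>
      if pvVget visited i j then none else some (i, j)))

-- A's closure `_find_regions`: marks the position visited, returns the unvisited same-character neighbours
def find_regions_A (puzzle : List String) (rows cols : Int) (pos : Int × Int)
    (visited : List (List Bool)) : List (List Bool) × List (Int × Int) :=
  let c := pvCharAt puzzle pos.1 pos.2
  let v' := pvSetTrue visited pos.1 pos.2
  (v', (get_neighbors pos.1 pos.2 rows cols).filter
        (fun p => !pvVget v' p.1 p.2 && (pvCharAt puzzle p.1 p.2 == c)))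

-- termination helpers, cited by the loops' decreasing_by
theorem pvSum_set_lt (l : List Nat) (n x : Nat) (h : n < l.length) (hx : x < l[n]) :
    (l.set n x).sum < l.sum := by
  rw [List.set_eq_take_append_cons_drop, if_pos h]
  conv_rhs => rw [← List.take_append_drop n l, ← List.getElem_cons_drop h]
  simp only [List.sum_append, List.sum_cons]
  omega

theorem pvSetTrue_lt_or_eq (v : List (List Bool)) (i j : Int) :
    pvUnvis (pvSetTrue v i j) < pvUnvis v ∨ (pvSetTrue v i j = v ∧ pvVget v i j = true) := by
  unfold pvSetTrue pvVget
  rcases Nat.lt_or_ge i.toNat v.length with ha | ha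
  · rw [List.modify_eq_set_get _ ha]
    simp only [List.get_eq_getElem]
    rcases Nat.lt_or_ge j.toNat (v[i.toNat]).length with hb | hb
    · cases hv : v[i.toNat][j.toNat]
      · left
        unfold pvUnvis
        rw [List.map_set]
        apply pvSum_set_lt _ _ _ (by simpa using ha)
        rw [List.getElem_map]
        rw [List.count_set hb]
        have hmem : false ∈ v[i.toNat] := by rw [← hv]; exact List.getElem_mem hb
        have h1 : 0 < (v[i.toNat]).count false := List.count_pos_iff.mpr hmem
        simp [hv]; omega
      · right
        constructor
        · conv_lhs => rw [show true = v[i.toNat][j.toNat] from hv.symm]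
          rw [List.set_getElem_self hb, List.set_getElem_self ha]
        · split
          · rw [List.getD_eq_getElem _ _ ha, List.getD_eq_getElem _ _ hb, hv]
          · rfl
    · right
      constructor
      · rw [List.set_eq_of_length_le hb, List.set_getElem_self ha]
      · split
        · rw [List.getD_eq_getElem _ _ ha, List.getD_eq_default _ _ hb]
        · rfl
  · right
    constructor
    · exact List.modify_eq_self ha
    · split
      · rw [List.getD_eq_default _ _ ha]; rfl
      · rfl

theorem pvSetTrue_le (v : List (List Bool)) (i j : Int) :
    pvUnvis (pvSetTrue v i j) ≤ pvUnvis v := by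
  rcases pvSetTrue_lt_or_eq v i j with h | ⟨h, _⟩
  · exact Nat.le_of_lt h
  · rw [h]

theorem pvSetTrue_lt_of_false {v : List (List Bool)} {i j : Int}
    (h : pvVget v i j = false) : pvUnvis (pvSetTrue v i j) < pvUnvis v := by
  rcases pvSetTrue_lt_or_eq v i j with h' | ⟨_, h'⟩
  · exact h'
  · rw [h'] at h; cases h

-- A's inner `while new_regions:` loop.  The Python stack pops from the END (`list.pop()`);
-- it is kept here in reversed order: head = top, `new_regions += ns` becomes `ns.reverse ++ rest`.
def fillA (puzzle : List String) (rows cols r : Int)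
    (d : PySem.Dict Int (List (Int × Int))) (visited : List (List Bool))
    (stack : List (Int × Int)) : PySem.Dict Int (List (Int × Int)) × List (List Bool) :=
  match stack with
  | [] => (d, visited)
  | x :: rest =>
      let d' := d.insert r (PySem.Set.add (d.getD r []) x)
      let res := find_regions_A puzzle rows cols x visited
      fillA puzzle rows cols r d' res.1 (res.2.reverse ++ rest)
termination_by (pvUnvis visited, (stack.filter (fun p => pvVget visited p.1 p.2)).length)
decreasing_by
  simp only [find_regions_A]
  rcases pvSetTrue_lt_or_eq visited x.1 x.2 with h | ⟨heq, hvt⟩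
  · exact Prod.Lex.left _ _ h
  · rw [heq]
    apply Prod.Lex.right
    have hnil : List.filter (fun p => pvVget visited p.1 p.2) (List.filter (fun p => !pvVget visited p.1 p.2 && (pvCharAt puzzle p.1 p.2 == pvCharAt puzzle x.1 x.2)) (get_neighbors x.1 x.2 rows cols)).reverse = [] := by
      rw [List.filter_eq_nil_iff]
      intro p hp
      rw [List.mem_reverse, List.mem_filter] at hp
      have := hp.2
      simp at this
      simp [this.1]
    rw [List.filter_append, hnil, List.filter_cons, if_pos hvt]
    simp


-- cited by outerA's decreasing_by
theorem fillA_unvis_le (puzzle : List String) (rows cols r : Int) (d : PySem.Dict Int (List (Int × Int)))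
    (visited : List (List Bool)) (stack : List (Int × Int)) :
    pvUnvis (fillA puzzle rows cols r d visited stack).2 ≤ pvUnvis visited := by
  fun_induction fillA puzzle rows cols r d visited stack with
  | case1 => exact Nat.le_refl _
  | case2 d visited x rest d' res ih =>
      refine le_trans ih ?_
      simp only [res, find_regions_A]
      exact pvSetTrue_le visited x.1 x.2

theorem next_unvisited_some {visited : List (List Bool)} {pos : Int × Int}
    (h : next_unvisited_region visited = some pos) : pvVget visited pos.1 pos.2 = false := by
  unfold next_unvisited_region at h
  simp only [List.findSome?_eq_some_iff] at h
  obtain ⟨_, i, _, _, hi, _⟩ := h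
  obtain ⟨_, j, _, _, hj, _⟩ := hi
  by_cases hv : pvVget visited i j = true
  · rw [if_pos hv] at hj; cases hj
  · rw [if_neg hv] at hj
    obtain rfl : (i, j) = pos := by injection hj
    rwa [Bool.not_eq_true] at hv

-- A's outer `while unvisited_region := next_unvisited_region(visited):` loop
def outerA (puzzle : List String) (rows cols : Int)
    (d : PySem.Dict Int (List (Int × Int))) (r : Int) (visited : List (List Bool)) :
    PySem.Dict Int (List (Int × Int)) :=
  match h : next_unvisited_region visited with
  | none => d
  | some pos =>
      let d1 := d.insert r (PySem.Set.add (d.getD r []) pos)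
      let res := find_regions_A puzzle rows cols pos visited
      let res2 := fillA puzzle rows cols r d1 res.1 res.2.reverse
      outerA puzzle rows cols res2.1 (r + 1) res2.2
termination_by pvUnvis visited
decreasing_by
  calc pvUnvis res2.2 ≤ pvUnvis res.1 := fillA_unvis_le _ _ _ _ _ _ _
    _ < pvUnvis visited := by
        simp only [res, find_regions_A]
        exact pvSetTrue_lt_of_false (next_unvisited_some h)

def find_region (puzzle : List String) : List (Int × List (Int × Int)) :=
  let rows : Int := puzzle.length
  let cols : Int := PySem.Str.len (puzzle.headD "")  -- len(puzzle[0]); IndexError on [] is excluded by Pre_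
  let visited := List.replicate rows.toNat (List.replicate cols.toNat false)
  (outerA puzzle rows cols PySem.Dict.empty 0 visited).items

-- ===== PORT B =====
-- B's inner flood-fill loop; same reversed-stack representation (Python pops from the end).
def fillB (puzzle : List String) (rows cols : Int) (ch : Char)
    (cells : List (Int × Int)) (visited : List (List Bool)) (stack : List (Int × Int)) :
    List (Int × Int) × List (List Bool) :=
  match stack with
  | [] => (cells, visited)
  | x :: rest =>
      let cells' := PySem.Set.add cells x
      let v' := pvSetTrue visited x.1 x.2
      let ns := [(x.1 - 1, x.2), (x.1 + 1, x.2), (x.1, x.2 - 1), (x.1, x.2 + 1)].filter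
          (fun q => (decide (0 ≤ q.1) && decide (q.1 < rows) && decide (0 ≤ q.2) && decide (q.2 < cols))
            && !pvVget v' q.1 q.2 && (pvCharAt puzzle q.1 q.2 == ch))
      fillB puzzle rows cols ch cells' v' (ns.reverse ++ rest)
termination_by (pvUnvis visited, (stack.filter (fun p => pvVget visited p.1 p.2)).length)
decreasing_by
  rcases pvSetTrue_lt_or_eq visited x.1 x.2 with h | ⟨heq, hvt⟩
  · exact Prod.Lex.left _ _ h
  · rw [heq]
    apply Prod.Lex.right
    rw [List.filter_append]
    have hnil : List.filter (fun p => pvVget visited p.1 p.2)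
        (List.filter (fun q => decide (0 ≤ q.1) && decide (q.1 < rows) && decide (0 ≤ q.2) && decide (q.2 < cols)
            && !pvVget visited q.1 q.2 && (pvCharAt puzzle q.1 q.2 == ch))
          [(x.1 - 1, x.2), (x.1 + 1, x.2), (x.1, x.2 - 1), (x.1, x.2 + 1)]).reverse = [] := by
      rw [List.filter_eq_nil_iff]
      intro p hp
      rw [List.mem_reverse, List.mem_filter] at hp
      have := hp.2
      simp only [Bool.and_eq_true, Bool.not_eq_true'] at this
      simp [this.1.2]
    rw [hnil, List.filter_cons, if_pos hvt]
    simp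

-- B's single advancing row-major scan.  `regions[label] = cells` with an always-fresh label is a list append.
def find_region_alt (puzzle : List String) : List (Int × List (Int × Int)) :=
  let rows : Int := puzzle.length
  let cols : Int := PySem.Str.len (puzzle.headD "")
  let visited := List.replicate rows.toNat (List.replicate cols.toNat false)
  let step := fun (st : List (Int × List (Int × Int)) × Int × List (List Bool)) (p : Int × Int) =>
    if pvVget st.2.2 p.1 p.2 then st
    else
      let res := fillB puzzle rows cols (pvCharAt puzzle p.1 p.2) [] st.2.2 [p]
      (st.1 ++ [(st.2.1, res.1)], st.2.1 + 1, res.2)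
  (((PySem.List.pyRange 0 rows 1).flatMap (fun i =>
      (PySem.List.pyRange 0 cols 1).map (fun j => (i, j)))).foldl step ([], 0, visited)).1

-- ===== PRECONDITION & SPEC =====
-- Pre_ excludes exactly the inputs where Python A raises IndexError: the empty list
-- (puzzle[0]) and grids with a row shorter than the first row (puzzle[i][j] while visiting).
def Pre_find_region (puzzle : List String) : Prop :=
  puzzle ≠ [] ∧ ∀ s ∈ puzzle, PySem.Str.len (puzzle.headD "") ≤ PySem.Str.len s
instance (puzzle : List String) : Decidable (Pre_find_region puzzle) := by
  unfold Pre_find_region; infer_instance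

def pvWitness_find_region : List String := (["AB", "AA"])

def Spec_find_region (puzzle : List String) (out : List (Int × List (Int × Int))) : Prop := out = find_region_alt puzzle
instance (puzzle : List String) (out : List (Int × List (Int × Int))) : Decidable (Spec_find_region puzzle out) := by unfold Spec_find_region; infer_instance

-- ===== CLAIM (what is proved, stated in full; the proofs are below) =====
def Claim_equal_find_region : Prop := ∀ (puzzle : List String), Dom_find_region puzzle → Pre_find_region puzzle → Spec_find_region puzzle (find_region puzzle)

-- ===== LEMMAS AND PROOFS =====

-- in-range positions and the shape of the `visited` matrix
def pvInR (rows cols : Int) (p : Int × Int) : Prop :=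
  0 ≤ p.1 ∧ p.1 < rows ∧ 0 ≤ p.2 ∧ p.2 < cols

def pvShape (rows cols : Int) (v : List (List Bool)) : Prop :=
  v.length = rows.toNat ∧ ∀ row ∈ v, row.length = cols.toNat

-- row-major list of all grid positions (the list B's scan folds over)
def pvCells (rows cols : Int) : List (Int × Int) :=
  (PySem.List.pyRange 0 rows 1).flatMap (fun i => (PySem.List.pyRange 0 cols 1).map (fun j => (i, j)))

theorem pvVget_def (v : List (List Bool)) (a b : Int) :
    pvVget v a b = if 0 ≤ a ∧ 0 ≤ b then ((v[a.toNat]?.getD [])[b.toNat]?.getD true) else true := by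
  unfold pvVget
  simp only [List.getD_eq_getElem?_getD]

theorem pvShape_setTrue {rows cols : Int} {v : List (List Bool)} (h : pvShape rows cols v)
    (i j : Int) : pvShape rows cols (pvSetTrue v i j) := by
  obtain ⟨h1, h2⟩ := h
  refine ⟨by simp [pvSetTrue, h1], ?_⟩
  intro row hrow
  rw [List.mem_iff_getElem?] at hrow
  obtain ⟨k, hk⟩ := hrow
  rw [pvSetTrue, List.getElem?_modify] at hk
  cases hv : v[k]? with
  | none => rw [hv] at hk; cases hk
  | some row0 =>
      rw [hv] at hk
      simp only [Option.map_eq_map, Option.map_some, Option.some_inj] at hk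
      have hm := h2 row0 (List.mem_of_getElem? hv)
      subst hk
      split <;> simpa using hm

theorem pvVget_setTrue_true {v : List (List Bool)} {a b : Int} (i j : Int)
    (h : pvVget v a b = true) : pvVget (pvSetTrue v i j) a b = true := by
  rw [pvVget_def] at h ⊢
  by_cases hab : 0 ≤ a ∧ 0 ≤ b
  · rw [if_pos hab] at h ⊢
    rw [pvSetTrue, List.getElem?_modify]
    cases hv : v[a.toNat]? with
    | none => simp only [hv, Option.map_eq_map, Option.map_none, Option.getD_none] at h ⊢; exact h
    | some row =>
        simp only [hv, Option.map_eq_map, Option.map_some, Option.getD_some] at h ⊢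
        by_cases hik : i.toNat = a.toNat
        · rw [if_pos hik, List.getElem?_set]
          by_cases hjb : j.toNat = b.toNat
          · rw [if_pos hjb]
            split <;> simp
          · rw [if_neg hjb]; exact h
        · rw [if_neg hik]; exact h
  · rw [if_neg hab]

theorem pvVget_setTrue_self {rows cols : Int} {v : List (List Bool)} {p : Int × Int}
    (hs : pvShape rows cols v) (hp : pvInR rows cols p) :
    pvVget (pvSetTrue v p.1 p.2) p.1 p.2 = true := by
  obtain ⟨h1, h2, h3, h4⟩ := hp
  obtain ⟨hl, hr⟩ := hs
  have ha : p.1.toNat < v.length := by omega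
  have hrow : (v[p.1.toNat]).length = cols.toNat := hr _ (List.getElem_mem ha)
  have hb : p.2.toNat < (v[p.1.toNat]).length := by omega
  rw [pvVget_def, if_pos ⟨h1, h3⟩, pvSetTrue, List.modify_eq_set_get _ ha]
  simp only [List.get_eq_getElem]
  rw [List.getElem?_set, if_pos rfl, if_pos ha]
  simp only [Option.getD_some]
  rw [List.getElem?_set, if_pos rfl, if_pos hb]
  rfl

-- membership in the row-major cell list = being in range
theorem pv_mem_cells {rows cols : Int} {p : Int × Int} :
    p ∈ pvCells rows cols ↔ pvInR rows cols p := by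
  unfold pvCells pvInR
  simp only [List.mem_flatMap, List.mem_map, PySem.List.mem_pyRange_one]
  constructor
  · rintro ⟨i, ⟨hi0, hi1⟩, j, ⟨hj0, hj1⟩, rfl⟩
    exact ⟨hi0, hi1, hj0, hj1⟩
  · rintro ⟨h1, h2, h3, h4⟩
    exact ⟨p.1, ⟨h1, h2⟩, p.2, ⟨h3, h4⟩, rfl⟩

-- A's neighbour filter = B's neighbour filter, at an in-range position
theorem pv_ns_eq (puzzle : List String) (rows cols : Int) (i j : Int)
    (hx : pvInR rows cols (i, j)) (v' : List (List Bool)) (ch : Char)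
    (hch : pvCharAt puzzle i j = ch) :
    (get_neighbors i j rows cols).filter
        (fun p => !pvVget v' p.1 p.2 && (pvCharAt puzzle p.1 p.2 == pvCharAt puzzle i j))
      = [(i - 1, j), (i + 1, j), (i, j - 1), (i, j + 1)].filter
        (fun q => (decide (0 ≤ q.1) && decide (q.1 < rows) && decide (0 ≤ q.2) && decide (q.2 < cols))
          && !pvVget v' q.1 q.2 && (pvCharAt puzzle q.1 q.2 == ch)) := by
  obtain ⟨h1, h2, h3, h4⟩ := hx
  subst hch
  have a1 : (0 ≤ i - 1) = (i > 0) := by simp; omega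
  have a2 : (i - 1 < rows) = True := by simp; omega
  have a3 : (0 ≤ i + 1) = True := by simp; omega
  have a4 : (i + 1 < rows) = (i < rows - 1) := by simp; omega
  have b1 : (0 ≤ j - 1) = (j > 0) := by simp; omega
  have b2 : (j - 1 < cols) = True := by simp; omega
  have b3 : (0 ≤ j + 1) = True := by simp; omega
  have b4 : (j + 1 < cols) = (j < cols - 1) := by simp; omega
  have c1 : (0 ≤ i) = True := by simp; omega
  have c2 : (i < rows) = True := by simp; omega
  have c3 : (0 ≤ j) = True := by simp; omega
  have c4 : (j < cols) = True := by simp; omega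
  unfold get_neighbors
  simp only [List.filter_cons, List.filter_nil, List.filter_append,
    a1, a2, a3, a4, b1, b2, b3, b4, c1, c2, c3, c4, decide_true, Bool.true_and, Bool.and_true]
  by_cases d1 : i > 0 <;> by_cases d2 : i < rows - 1 <;> by_cases d3 : j > 0 <;>
    by_cases d4 : j < cols - 1 <;>
    simp [d1, d2, d3, d4, List.filter_cons] <;>
    split_ifs <;> simp

-- ---- Dict helper lemmas ----
theorem pv_not_mem_of_contains_false {d : PySem.Dict Int (List (Int × Int))} {k : Int}
    (h : d.contains k = false) : ∀ p ∈ d.items, p.1 ≠ k := by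
  intro p hp hpk
  have : k ∈ d.keys := by
    unfold PySem.Dict.keys
    exact List.mem_map.mpr ⟨p, hp, hpk⟩
  rw [← PySem.Dict.contains_iff_mem_keys] at this
  rw [h] at this
  cases this

theorem pv_insert_insert (d : PySem.Dict Int (List (Int × Int))) (k : Int)
    (v w : List (Int × Int)) : (d.insert k v).insert k w = d.insert k w := by
  apply PySem.Dict.ext
  cases hc : d.contains k with
  | true =>
      rw [PySem.Dict.items_insert_of_contains _ _ (by
        rw [PySem.Dict.contains_insert, hc]; simp)]
      rw [PySem.Dict.items_insert_of_contains _ _ hc,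
        PySem.Dict.items_insert_of_contains _ _ hc]
      rw [List.map_map]
      apply List.map_congr_left
      intro p _
      by_cases hpk : p.1 = k <;> simp [hpk]
  | false =>
      rw [PySem.Dict.items_insert_of_contains _ _ (by
        rw [PySem.Dict.contains_insert, hc]; simp)]
      rw [PySem.Dict.items_insert_of_not_contains _ _ hc,
        PySem.Dict.items_insert_of_not_contains _ _ hc]
      rw [List.map_append]
      congr 1
      · conv_rhs => rw [← List.map_id d.items]
        apply List.map_congr_left
        intro p hp
        have := pv_not_mem_of_contains_false hc p hp
        simp [this]
      · simp

theorem pv_insert_getD_self {d : PySem.Dict Int (List (Int × Int))} {k : Int}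
    (hnd : d.keys.Nodup) (hc : d.contains k = true) : d.insert k (d.getD k []) = d := by
  apply PySem.Dict.ext
  rw [PySem.Dict.items_insert_of_contains _ _ hc]
  conv_rhs => rw [← List.map_id d.items]
  apply List.map_congr_left
  intro p hp
  by_cases hpk : p.1 = k
  · have hp' : (p.1, p.2) ∈ d.items := by simpa using hp
    have hget : d.get? p.1 = some p.2 := PySem.Dict.get?_of_mem_items _ hp' hnd
    rw [hpk] at hget
    have : d.getD k [] = p.2 := by rw [PySem.Dict.getD_eq_get?_getD, hget]; rfl
    simp [hpk, this, Prod.ext_iff]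
  · simp [hpk]

-- ---- one-step unfolding of the loops ----
theorem pv_fillB_cons (puzzle : List String) (rows cols : Int) (ch : Char)
    (cells : List (Int × Int)) (visited : List (List Bool))
    (x : Int × Int) (rest : List (Int × Int)) :
    fillB puzzle rows cols ch cells visited (x :: rest)
      = fillB puzzle rows cols ch (PySem.Set.add cells x) (pvSetTrue visited x.1 x.2)
          (([(x.1 - 1, x.2), (x.1 + 1, x.2), (x.1, x.2 - 1), (x.1, x.2 + 1)].filter
            (fun q => (decide (0 ≤ q.1) && decide (q.1 < rows) && decide (0 ≤ q.2) && decide (q.2 < cols))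
              && !pvVget (pvSetTrue visited x.1 x.2) q.1 q.2 && (pvCharAt puzzle q.1 q.2 == ch))).reverse ++ rest) := by
  rw [fillB.eq_def]

-- ---- properties of B's flood fill ----
theorem pv_fillB_vget_mono (puzzle : List String) (rows cols : Int) (ch : Char) :
    ∀ cells visited stack {a b : Int}, pvVget visited a b = true →
      pvVget (fillB puzzle rows cols ch cells visited stack).2 a b = true := by
  intro cells visited stack
  fun_induction fillB puzzle rows cols ch cells visited stack with
  | case1 => intro a b h; exact h
  | case2 =>
      rename_i cells visited x rest cells' v' ns ih
      intro a b h
      exact ih (pvVget_setTrue_true _ _ h)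

theorem pv_fillB_shape (puzzle : List String) (rows cols : Int) (ch : Char) :
    ∀ cells visited stack, pvShape rows cols visited →
      pvShape rows cols (fillB puzzle rows cols ch cells visited stack).2 := by
  intro cells visited stack
  fun_induction fillB puzzle rows cols ch cells visited stack with
  | case1 => intro h; exact h
  | case2 =>
      rename_i cells visited x rest cells' v' ns ih
      intro h
      exact ih (pvShape_setTrue h _ _)

-- ---- the two flood fills agree step for step ----
theorem pv_fill_eq (puzzle : List String) (rows cols : Int) (ch : Char) (r : Int) :
    ∀ d visited stack, d.keys.Nodup → d.contains r = true →
      (∀ p ∈ stack, pvInR rows cols p ∧ pvCharAt puzzle p.1 p.2 = ch) →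
      fillA puzzle rows cols r d visited stack
        = (d.insert r (fillB puzzle rows cols ch (d.getD r []) visited stack).1,
           (fillB puzzle rows cols ch (d.getD r []) visited stack).2) := by
  intro d visited stack
  fun_induction fillA puzzle rows cols r d visited stack with
  | case1 d visited =>
      intro hnd hc _
      rw [fillB]
      simp only
      rw [pv_insert_getD_self hnd hc]
  | case2 =>
      rename_i d visited x rest d' res ih
      intro hnd hc hstack
      obtain ⟨hxR, hxc⟩ := hstack x (List.mem_cons_self)
      have hns : res.2 = [(x.1 - 1, x.2), (x.1 + 1, x.2), (x.1, x.2 - 1), (x.1, x.2 + 1)].filter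
          (fun q => (decide (0 ≤ q.1) && decide (q.1 < rows) && decide (0 ≤ q.2) && decide (q.2 < cols))
            && !pvVget (pvSetTrue visited x.1 x.2) q.1 q.2 && (pvCharAt puzzle q.1 q.2 == ch)) := by
        simp only [res, find_regions_A]
        exact pv_ns_eq puzzle rows cols x.1 x.2 (by rwa [show ((x.1, x.2) : Int × Int) = x from rfl])
          (pvSetTrue visited x.1 x.2) ch hxc
      have hres1 : res.1 = pvSetTrue visited x.1 x.2 := by simp only [res, find_regions_A]
      have hstack' : ∀ p ∈ res.2.reverse ++ rest, pvInR rows cols p ∧ pvCharAt puzzle p.1 p.2 = ch := by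
        intro p hp
        rw [List.mem_append, List.mem_reverse] at hp
        rcases hp with hp | hp
        · rw [hns, List.mem_filter] at hp
          obtain ⟨-, hcond⟩ := hp
          simp only [Bool.and_eq_true, decide_eq_true_eq, beq_iff_eq] at hcond
          exact ⟨⟨hcond.1.1.1.1.1, hcond.1.1.1.1.2, hcond.1.1.1.2, hcond.1.1.2⟩, hcond.2⟩
        · exact hstack p (List.mem_cons_of_mem _ hp)
      have ih' := ih (PySem.Dict.nodup_keys_insert _ _ _ hnd) (PySem.Dict.contains_insert_self _ _ _) hstack'
      rw [ih']
      rw [pv_fillB_cons, ← hns, ← hres1]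
      rw [show (d.insert r (PySem.Set.add (d.getD r []) x)).getD r [] = PySem.Set.add (d.getD r []) x from
        PySem.Dict.getD_insert_self _ _ _ _]
      rw [pv_insert_insert]

-- ---- seed search: A's rescan finds the first unvisited cell of the row-major list ----
theorem pv_findSome?_inner (g : Int → Int → Bool) (i : Int) (m : List Int) :
    (m.findSome? fun j => if g i j then none else some (i, j))
      = (m.map (fun j => (i, j))).find? (fun p => !g p.1 p.2) := by
  induction m with
  | nil => rfl
  | cons j t ihm =>
      rw [List.findSome?_cons, List.map_cons, List.find?_cons]
      by_cases h : g i j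
      · simp [h, ihm]
      · simp [h]

theorem pv_findSome?_pairs (g : Int → Int → Bool) (l m : List Int) :
    (l.findSome? fun i => m.findSome? fun j => if g i j then none else some (i, j))
      = (l.flatMap fun i => m.map fun j => (i, j)).find? (fun p => !g p.1 p.2) := by
  induction l with
  | nil => rfl
  | cons i t ihl =>
      rw [List.findSome?_cons, List.flatMap_cons, List.find?_append, pv_findSome?_inner g i m, ihl]
      cases (m.map (fun j => (i, j))).find? (fun p => !g p.1 p.2) <;> simp

theorem pv_next_unvisited_char (rows cols : Int) (visited : List (List Bool))
    (hr : 0 ≤ rows) (hc : 0 ≤ cols) (hs : pvShape rows cols visited) :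
    next_unvisited_region visited = (pvCells rows cols).find? (fun p => !pvVget visited p.1 p.2) := by
  obtain ⟨h1, h2⟩ := hs
  unfold next_unvisited_region pvCells
  rcases visited with _ | ⟨row, t⟩
  · have hrow0 : rows = 0 := by simp at h1; omega
    subst hrow0
    simp [PySem.List.pyRange_one_eq_nil]
  · have e1 : (((row :: t).length : Nat) : Int) = rows := by rw [h1, Int.toNat_of_nonneg hr]
    have e2 : ((((row :: t).headD []).length : Nat) : Int) = cols := by
      have : row.length = cols.toNat := h2 row List.mem_cons_self
      simp [this, Int.toNat_of_nonneg hc]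
    simp only [e1, e2]
    exact pv_findSome?_pairs _ _ _

-- a fold that skips visited cells leaves the state alone
theorem pv_foldl_fix {α β : Type} (f : α → β → α) (s : α) (l : List β)
    (h : ∀ p ∈ l, f s p = s) : l.foldl f s = s := by
  induction l with
  | nil => rfl
  | cons x t ih =>
      rw [List.foldl_cons, h x List.mem_cons_self]
      exact ih (fun p hp => h p (List.mem_cons_of_mem _ hp))

-- ---- outer loops: A's rescan-driven loop = B's advancing scan ----
theorem pv_outer_eq (puzzle : List String) (rows cols : Int) (hr : 0 ≤ rows) (hc : 0 ≤ cols) :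
    ∀ (n : Nat) (suf : List (Int × Int)) (visited : List (List Bool))
      (d : PySem.Dict Int (List (Int × Int))) (r : Int) (pre : List (Int × Int)),
      suf.length ≤ n →
      pvCells rows cols = pre ++ suf →
      (∀ p ∈ pre, pvVget visited p.1 p.2 = true) →
      pvShape rows cols visited →
      d.keys.Nodup → (∀ k ∈ d.keys, k < r) →
      (outerA puzzle rows cols d r visited).items
        = (suf.foldl (fun st p =>
            if pvVget st.2.2 p.1 p.2 then st
            else
              let res := fillB puzzle rows cols (pvCharAt puzzle p.1 p.2) [] st.2.2 [p]
              (st.1 ++ [(st.2.1, res.1)], st.2.1 + 1, res.2))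
            (d.items, r, visited)).1 := by
  intro n
  induction n with
  | zero =>
      intro suf visited d r pre hlen hcells hpre hs hnd hkeys
      have hsuf : suf = [] := List.length_eq_zero_iff.mp (Nat.le_zero.mp hlen)
      subst hsuf
      have hnone : next_unvisited_region visited = none := by
        rw [pv_next_unvisited_char rows cols visited hr hc hs, hcells, List.append_nil]
        rw [List.find?_eq_none]
        intro p hp
        simp [hpre p hp]
      rw [outerA.eq_def]
      split
      · rfl
      · next pos heq => rw [hnone] at heq; cases heq
  | succ n ihn =>
      intro suf visited d r pre hlen hcells hpre hs hnd hkeys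
      have hprenone : pre.find? (fun p => !pvVget visited p.1 p.2) = none := by
        rw [List.find?_eq_none]
        intro p hp
        simp [hpre p hp]
      have hnu : next_unvisited_region visited
          = suf.find? (fun p => !pvVget visited p.1 p.2) := by
        rw [pv_next_unvisited_char rows cols visited hr hc hs, hcells, List.find?_append,
          hprenone, Option.none_or]
      cases hfind : suf.find? (fun p => !pvVget visited p.1 p.2) with
      | none =>
          have hnone : next_unvisited_region visited = none := by rw [hnu, hfind]
          rw [outerA.eq_def]
          split
          · rw [pv_foldl_fix _ _ _ (by
              intro p hp
              have := List.find?_eq_none.mp hfind p hp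
              simp only [Bool.not_eq_true', Bool.not_eq_false] at this
              simp [this])]
          · next pos heq => rw [hnone] at heq; cases heq
      | some pos =>
          have hnupos : next_unvisited_region visited = some pos := by rw [hnu, hfind]
          obtain ⟨hppos, s1, s2, hsuf, hs1⟩ := List.find?_eq_some_iff_append.mp hfind
          simp only [Bool.not_eq_true'] at hppos
          have hs1' : ∀ a ∈ s1, pvVget visited a.1 a.2 = true := by
            intro a ha
            have := hs1 a ha
            simpa using this
          have hposR : pvInR rows cols pos := by
            apply pv_mem_cells.mp
            rw [hcells, hsuf]
            simp
          have hcontr : d.contains r = false := by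
            cases hcr : d.contains r with
            | false => rfl
            | true =>
                have := hkeys r ((PySem.Dict.contains_iff_mem_keys d r).mp hcr)
                omega
          have hgetD : d.getD r [] = [] := PySem.Dict.getD_of_not_contains _ _ hcontr
          -- the two flood fills from the seed agree
          have hns : (find_regions_A puzzle rows cols pos visited).2
              = [(pos.1 - 1, pos.2), (pos.1 + 1, pos.2), (pos.1, pos.2 - 1), (pos.1, pos.2 + 1)].filter
                (fun q => (decide (0 ≤ q.1) && decide (q.1 < rows) && decide (0 ≤ q.2) && decide (q.2 < cols))
                  && !pvVget (pvSetTrue visited pos.1 pos.2) q.1 q.2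
                  && (pvCharAt puzzle q.1 q.2 == pvCharAt puzzle pos.1 pos.2)) := by
            simp only [find_regions_A]
            exact pv_ns_eq puzzle rows cols pos.1 pos.2
              (by rwa [show ((pos.1, pos.2) : Int × Int) = pos from rfl])
              (pvSetTrue visited pos.1 pos.2) _ rfl
          have hres1 : (find_regions_A puzzle rows cols pos visited).1
              = pvSetTrue visited pos.1 pos.2 := by simp only [find_regions_A]
          have hstackinv : ∀ p ∈ (find_regions_A puzzle rows cols pos visited).2.reverse,
              pvInR rows cols p ∧ pvCharAt puzzle p.1 p.2 = pvCharAt puzzle pos.1 pos.2 := by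
            intro p hp
            rw [List.mem_reverse, hns, List.mem_filter] at hp
            obtain ⟨-, hcond⟩ := hp
            simp only [Bool.and_eq_true, decide_eq_true_eq, beq_iff_eq] at hcond
            exact ⟨⟨hcond.1.1.1.1.1, hcond.1.1.1.1.2, hcond.1.1.1.2, hcond.1.1.2⟩, hcond.2⟩
          have hfill := pv_fill_eq puzzle rows cols (pvCharAt puzzle pos.1 pos.2) r
            (d.insert r (PySem.Set.add (d.getD r []) pos))
            (find_regions_A puzzle rows cols pos visited).1
            (find_regions_A puzzle rows cols pos visited).2.reverse
            (PySem.Dict.nodup_keys_insert _ _ _ hnd)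
            (PySem.Dict.contains_insert_self _ _ _)
            hstackinv
          have hfb : fillB puzzle rows cols (pvCharAt puzzle pos.1 pos.2)
                ((d.insert r (PySem.Set.add (d.getD r []) pos)).getD r [])
                (find_regions_A puzzle rows cols pos visited).1
                (find_regions_A puzzle rows cols pos visited).2.reverse
              = fillB puzzle rows cols (pvCharAt puzzle pos.1 pos.2) [] visited [pos] := by
            rw [PySem.Dict.getD_insert_self, hgetD, hres1, hns,
              pv_fillB_cons puzzle rows cols (pvCharAt puzzle pos.1 pos.2) [] visited pos []]
            rw [List.append_nil]
          rw [hfb] at hfill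
          -- abbreviate B's fill from the seed
          set FB := fillB puzzle rows cols (pvCharAt puzzle pos.1 pos.2) [] visited [pos] with hFB
          -- unfold one step of A's outer loop
          rw [outerA.eq_def]
          split
          · next heq => rw [hnupos] at heq; cases heq
          next pos' heq =>
          rw [hnupos] at heq
          injection heq with heq'
          subst heq'
          simp only [hfill, pv_insert_insert]
          -- unfold B's fold along suf = s1 ++ pos :: s2
          rw [hsuf, List.foldl_append, pv_foldl_fix _ (d.items, r, visited) s1 (by
            intro p hp
            simp [hs1' p hp]), List.foldl_cons]
          rw [if_neg (by simp [hppos])]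
          simp only
          -- apply the induction hypothesis on s2
          have hlen' : s2.length ≤ n := by
            rw [hsuf] at hlen
            simp [List.length_append] at hlen
            omega
          have hcells' : pvCells rows cols = (pre ++ (s1 ++ [pos])) ++ s2 := by
            rw [hcells, hsuf]
            simp
          have hpre' : ∀ p ∈ pre ++ (s1 ++ [pos]), pvVget FB.2 p.1 p.2 = true := by
            intro p hp
            rw [List.mem_append] at hp
            rcases hp with hp | hp
            · exact pv_fillB_vget_mono puzzle rows cols _ _ _ _ (hpre p hp)
            · rw [List.mem_append] at hp
              rcases hp with hp | hp
              · exact pv_fillB_vget_mono puzzle rows cols _ _ _ _ (hs1' p hp)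
              · rw [List.mem_singleton] at hp
                subst hp
                rw [hFB, pv_fillB_cons puzzle rows cols (pvCharAt puzzle p.1 p.2) [] visited p []]
                exact pv_fillB_vget_mono puzzle rows cols _ _ _ _ (pvVget_setTrue_self hs hposR)
          have hshape' : pvShape rows cols FB.2 := pv_fillB_shape puzzle rows cols _ _ _ _ hs
          have hnd' : (d.insert r FB.1).keys.Nodup := PySem.Dict.nodup_keys_insert _ _ _ hnd
          have hkeys' : ∀ k ∈ (d.insert r FB.1).keys, k < r + 1 := by
            intro k hk
            rw [PySem.Dict.mem_keys_insert] at hk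
            rcases hk with rfl | hk
            · omega
            · have := hkeys k hk; omega
          have := ihn s2 FB.2 (d.insert r FB.1) (r + 1) (pre ++ (s1 ++ [pos]))
            hlen' hcells' hpre' hshape' hnd' hkeys'
          rw [this, PySem.Dict.items_insert_of_not_contains _ _ hcontr]

-- ===== VERDICT (by name: the statement is the Claim_ definition above) =====
theorem find_region_spec : Claim_equal_find_region := by
  unfold Claim_equal_find_region
  intro puzzle _ _
  unfold Spec_find_region find_region find_region_alt
  simp only []
  have hr : (0 : Int) ≤ (puzzle.length : Int) := Int.natCast_nonneg _
  have hc : (0 : Int) ≤ PySem.Str.len (puzzle.headD "") := by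
    rw [PySem.Str.len_eq]
    exact Int.natCast_nonneg _
  have hshape : pvShape (puzzle.length : Int) (PySem.Str.len (puzzle.headD ""))
      (List.replicate (puzzle.length : Int).toNat (List.replicate (PySem.Str.len (puzzle.headD "")).toNat false)) := by
    constructor
    · simp
    · intro row hrow
      simp [List.eq_of_mem_replicate hrow]
  have := pv_outer_eq puzzle (puzzle.length : Int) (PySem.Str.len (puzzle.headD "")) hr hc
    (pvCells (puzzle.length : Int) (PySem.Str.len (puzzle.headD ""))).length
    (pvCells (puzzle.length : Int) (PySem.Str.len (puzzle.headD "")))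
    (List.replicate (puzzle.length : Int).toNat (List.replicate (PySem.Str.len (puzzle.headD "")).toNat false))
    PySem.Dict.empty 0 []
    (Nat.le_refl _) (by simp) (by intro p hp; cases hp) hshape
    (by rw [PySem.Dict.keys_empty]; exact List.nodup_nil)
    (by intro k hk; rw [PySem.Dict.keys_empty] at hk; cases hk)
  exact this
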